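-- pv_equiv track=rewrite | github.com/Jonathanseng/Linear-Algebra-For-Programming | 6. algebraic system quotient system.py | quotient_system
-- ===== SOURCE A (Python) =====
-- def quotient_system(V, S):
--   """
--   Returns the quotient system of V and S.
--
--   Args:
--     V: A vector space.
--     S: A subsystem of V.
--
--   Returns:
--     A vector space that is the quotient of V and S.
--   """
--
--   # Create the set of all vectors v in V such that v - s is in S for some s in S.
--   Q = set()
--   for v in V:
--     for s in S:
--       if v - s in S:
--         Q.add(v)
--
--   # Check if addition is closed.
--   for v1 in Q:
--     for v2 in Q:
--       if v1 + v2 not in Q: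
--         return None
--
--   # Check if scalar multiplication is closed.
--   for v in Q:
--     for c in [1, -1]:
--       if c * v not in Q:
--         return None
--
--   return Q
-- ===== SOURCE B (Python) =====
-- def quotient_system(V, S):
--     # Phase 1: build the sumset of S's distinct values once, filter V against it
--     # (v is in Q iff v = s + s' for some s, s' in S).
--     D = set(S)
--     P = {a + b for a in D for b in D}
--     Q = {v for v in V if v in P}
--     # Phase 2: closure is two subset tests on comprehension-built tables,
--     # instead of early-return nested scans.
--     sums = {x + y for x in Q for y in Q}
--     negs = {-x for x in Q}
--     if sums <= Q and negs <= Q: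
--         return Q
--     return None
-- ===== Notes on version B (the rewrite author's own statement) =====
-- stated objective: alternative
-- what changed: B builds the sumset of S's distinct values once and filters V against it (replacing A's nested V x S scan), then decides closure by two subset tests on comprehension-built tables (sums <= Q and negations <= Q) instead of A's early-return nested loops, using that 1*v is always in Q.
import Mathlib
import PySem

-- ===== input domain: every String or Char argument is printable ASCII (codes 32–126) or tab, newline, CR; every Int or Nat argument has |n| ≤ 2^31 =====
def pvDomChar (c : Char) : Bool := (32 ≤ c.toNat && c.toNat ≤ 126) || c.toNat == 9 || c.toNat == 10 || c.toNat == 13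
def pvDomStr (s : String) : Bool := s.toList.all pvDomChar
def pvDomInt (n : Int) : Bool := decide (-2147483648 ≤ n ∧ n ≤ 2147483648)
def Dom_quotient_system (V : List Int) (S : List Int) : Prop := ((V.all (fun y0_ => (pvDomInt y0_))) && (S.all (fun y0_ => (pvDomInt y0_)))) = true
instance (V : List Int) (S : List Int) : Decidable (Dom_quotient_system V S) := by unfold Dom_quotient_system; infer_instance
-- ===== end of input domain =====

-- B builds the sumset of S's distinct values once and filters V against it, then decides
-- closure by two subset tests on comprehension-built tables instead of A's early-return
-- nested scans (objective: alternative; no speed claim).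


-- ===== PORT A =====
def quotient_system (V : List Int) (S : List Int) : Option (List Int) :=
  let Q : PySem.Set Int :=
    V.foldl (fun Q v =>
      S.foldl (fun Q s => if (v - s) ∈ S then PySem.Set.add Q v else Q) Q)
      PySem.Set.empty
  if Q.any (fun v1 => Q.any (fun v2 => !(decide ((v1 + v2) ∈ Q)))) then none
  else if Q.any (fun v => ([1, -1] : List Int).any (fun c => !(decide ((c * v) ∈ Q)))) then none
  else some Q

-- ===== PORT B =====
def quotient_system_alt (V : List Int) (S : List Int) : Option (List Int) :=
  let D : PySem.Set Int := PySem.Set.ofList S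
  let P : PySem.Set Int := PySem.Set.ofList (D.flatMap (fun a => D.map (fun b => a + b)))
  let Q : PySem.Set Int :=
    V.foldl (fun Q v => if v ∈ P then PySem.Set.add Q v else Q) PySem.Set.empty
  let sums : PySem.Set Int := PySem.Set.ofList (Q.flatMap (fun x => Q.map (fun y => x + y)))
  let negs : PySem.Set Int := PySem.Set.ofList (Q.map (fun x => -x))
  if PySem.Set.issubset sums Q && PySem.Set.issubset negs Q then some Q else none

-- ===== PRECONDITION & SPEC =====
def Spec_quotient_system (V : List Int) (S : List Int) (out : Option (List Int)) : Prop := out = quotient_system_alt V S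
instance (V : List Int) (S : List Int) (out : Option (List Int)) : Decidable (Spec_quotient_system V S out) := by unfold Spec_quotient_system; infer_instance

-- ===== CLAIM (what is proved, stated in full; the proofs are below) =====
def Claim_equal_quotient_system : Prop := ∀ (V : List Int) (S : List Int), Dom_quotient_system V S → Spec_quotient_system V S (quotient_system V S)

-- ===== LEMMAS AND PROOFS =====

-- Folding a step that only ever adds v is the identity once v is already in the set.
lemma fold_add_of_mem (v : Int) (p : Int → Prop) [DecidablePred p] :
    ∀ (T : List Int) (Q : PySem.Set Int), v ∈ Q →
      T.foldl (fun Q s => if p s then PySem.Set.add Q v else Q) Q = Q := by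
  intro T
  induction T with
  | nil => intro Q _; rfl
  | cons s T ih =>
    intro Q hv
    simp only [List.foldl_cons]
    split_ifs with h
    · have : PySem.Set.add Q v = Q := by
        simp [PySem.Set.add, PySem.Set.contains, hv]
      rw [this]; exact ih Q hv
    · exact ih Q hv

-- A's inner scan over S collapses to one conditional insertion.
lemma inner_scan (v : Int) (S : List Int) :
    ∀ (T : List Int) (Q : PySem.Set Int),
      T.foldl (fun Q s => if (v - s) ∈ S then PySem.Set.add Q v else Q) Q
        = if (∃ s ∈ T, (v - s) ∈ S) then PySem.Set.add Q v else Q := by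
  intro T
  induction T with
  | nil => intro Q; simp
  | cons s T ih =>
    intro Q
    simp only [List.foldl_cons]
    by_cases h : (v - s) ∈ S
    · rw [if_pos h, fold_add_of_mem v (fun s => (v - s) ∈ S)]
      · simp [h]
      · simp [PySem.Set.add, PySem.Set.contains]
        split_ifs <;> simp_all
    · rw [if_neg h, ih]
      have : (∃ s' ∈ s :: T, (v - s') ∈ S) ↔ (∃ s' ∈ T, (v - s') ∈ S) := by
        simp only [List.mem_cons]
        constructor
        · rintro ⟨s', hs', hm⟩
          rcases hs' with rfl | hs'
          · exact absurd hm h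
          · exact ⟨s', hs', hm⟩
        · rintro ⟨s', hs', hm⟩; exact ⟨s', Or.inr hs', hm⟩
      simp only [this]

-- A's condition "v - s ∈ S for some s ∈ S" is membership in B's sumset table.
lemma cond_iff (v : Int) (S : List Int) :
    (∃ s ∈ S, (v - s) ∈ S) ↔ v ∈ PySem.Set.ofList ((PySem.Set.ofList S).flatMap (fun a => (PySem.Set.ofList S).map (fun b => a + b))) := by
  rw [PySem.Set.mem_ofList]
  simp only [List.mem_flatMap, List.mem_map, PySem.Set.mem_ofList]
  constructor
  · rintro ⟨s, hs, hm⟩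
    exact ⟨s, hs, v - s, hm, by ring⟩
  · rintro ⟨a, ha, b, hb, rfl⟩
    exact ⟨a, ha, by simpa using hb⟩

-- A's additive early-return scan fails exactly when B's sum table is not a subset of Q.
lemma add_check_iff (Q : PySem.Set Int) :
    Q.any (fun v1 => Q.any (fun v2 => !(decide ((v1 + v2) ∈ Q)))) =
      !(PySem.Set.issubset (PySem.Set.ofList (Q.flatMap (fun x => Q.map (fun y => x + y)))) Q) := by
  rw [Bool.eq_iff_iff]
  simp [PySem.Set.issubset, PySem.Set.mem_ofList]

-- A's scalar scan over c ∈ [1, -1] fails exactly when B's negation table is not a subset of Q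
-- (the c = 1 case never fails since v itself is in Q).
lemma neg_check_iff (Q : PySem.Set Int) :
    Q.any (fun v => ([1, -1] : List Int).any (fun c => !(decide ((c * v) ∈ Q)))) =
      !(PySem.Set.issubset (PySem.Set.ofList (Q.map (fun x => -x))) Q) := by
  rw [Bool.eq_iff_iff]
  simp [PySem.Set.issubset, PySem.Set.mem_ofList]
  constructor
  · rintro ⟨x, hx, h | h⟩
    · exact absurd hx h
    · exact ⟨-x, by simpa using hx, h⟩
  · rintro ⟨y, hny, hy⟩
    exact ⟨-y, hny, Or.inr (by simpa using hy)⟩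

theorem quotient_system_spec : Claim_equal_quotient_system := by
  intro V S _
  unfold Spec_quotient_system quotient_system quotient_system_alt
  have hQ : V.foldl (fun Q v =>
      S.foldl (fun Q s => if (v - s) ∈ S then PySem.Set.add Q v else Q) Q)
      PySem.Set.empty
      = V.foldl (fun Q v =>
          if v ∈ PySem.Set.ofList ((PySem.Set.ofList S).flatMap (fun a => (PySem.Set.ofList S).map (fun b => a + b)))
          then PySem.Set.add Q v else Q) PySem.Set.empty := by
    apply PySem.List.foldl_congr_mem
    intro Q v _
    rw [inner_scan v S S Q]
    by_cases h : (∃ s ∈ S, (v - s) ∈ S)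
    · rw [if_pos h, if_pos ((cond_iff v S).mp h)]
    · rw [if_neg h, if_neg (fun hm => h ((cond_iff v S).mpr hm))]
  rw [hQ]
  simp only [add_check_iff, neg_check_iff]
  set Q := V.foldl (fun Q v =>
      if v ∈ PySem.Set.ofList ((PySem.Set.ofList S).flatMap (fun a => (PySem.Set.ofList S).map (fun b => a + b)))
      then PySem.Set.add Q v else Q) PySem.Set.empty with hQdef
  cases PySem.Set.issubset (PySem.Set.ofList (Q.flatMap (fun x => Q.map (fun y => x + y)))) Q <;>
    cases PySem.Set.issubset (PySem.Set.ofList (Q.map (fun x => -x))) Q <;> simp
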